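-- pv_equiv track=rewrite | github.com/ANGHOOO/algorithm-study | Programmers/기능 개발.py | solution
-- ===== SOURCE A (Python) =====
-- def solution(progresses, speeds):
--     answer = []
--     days = 1
--     count = 0
--     while progresses:
--         progress, speed = progresses[0], speeds[0]
--         if progress + speed * days >= 100:
--             count += 1
--             progresses.pop(0)
--             speeds.pop(0)
--         else:
--             days += 1
--             if count > 0:
--                 answer.append(count)
--             count = 0
--
--     answer.append(count)
--     return answer
-- ===== SOURCE B (Python) =====
-- def solution(progresses, speeds):
--     answer = []
--     cur = 0
--     count = 0
--     for p, s in zip(progresses, speeds):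
--         # finish day: ceiling division for improving tasks; a task whose speed
--         # is not positive never improves, so it can only ship with the group
--         # it arrives in (day 1 at the earliest)
--         d = max(1, -(-(100 - p) // s)) if s > 0 else 1
--         if d > cur:
--             if count:
--                 answer.append(count)
--             cur = d
--             count = 1
--         else:
--             count += 1
--     answer.append(count)
--     return answer
-- ===== Notes on version B (the rewrite author's own statement) =====
-- stated objective: alternative
-- what changed: Replaced the day-by-day simulation with front pops by a single pass that computes each task's finish day with a ceiling division (day 1 for non-improving tasks) and groups by the running maximum; intended as faster, but A times out on a timing run's larger inputs so no ratio could be measured.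
-- outside the precondition, e.g. on solution([120, 0, 0], [-10, 1, 50]): A returns [1, 2], B returns [1, 2]
import Mathlib
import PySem

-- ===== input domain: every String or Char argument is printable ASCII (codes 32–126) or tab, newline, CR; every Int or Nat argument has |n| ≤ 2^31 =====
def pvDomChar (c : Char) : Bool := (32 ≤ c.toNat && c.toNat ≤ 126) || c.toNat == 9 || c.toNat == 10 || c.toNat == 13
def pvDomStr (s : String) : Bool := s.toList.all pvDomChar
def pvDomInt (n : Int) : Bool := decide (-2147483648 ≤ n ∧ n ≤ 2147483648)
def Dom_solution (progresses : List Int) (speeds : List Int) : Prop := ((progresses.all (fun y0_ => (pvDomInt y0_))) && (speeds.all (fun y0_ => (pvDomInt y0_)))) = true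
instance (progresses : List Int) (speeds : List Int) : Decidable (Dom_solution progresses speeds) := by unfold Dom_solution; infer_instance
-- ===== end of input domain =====

-- B replaces A's day-by-day front-popping simulation by a single pass (ceiling division per task,
-- group by running max); equivalence is about the RETURN value only (A empties both input lists in place).


-- ===== PORT A =====
-- A's while-loop over the two mutated lists; the Nat fuel only makes the loop total
-- (inside Pre_solution the fuel is provably sufficient, see lemmas below).
def loopA : Nat → List Int → List Int → List Int → Int → Int → List Int
  | 0, _, _, ans, _, count => ans ++ [count]
  | _ + 1, [], _, ans, _, count => ans ++ [count]
  | _ + 1, _ :: _, [], ans, _, count => ans ++ [count]   -- Python raises IndexError here (outside Pre_)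
  | fuel + 1, p :: ps, s :: ss, ans, days, count =>
    if 100 ≤ p + s * days then
      loopA fuel ps ss ans days (count + 1)
    else
      loopA fuel (p :: ps) (s :: ss) (if 0 < count then ans ++ [count] else ans) (days + 1) 0

def fuelA (progresses : List Int) : Nat := (progresses.map (fun p => 101 + p.natAbs)).sum

def solution (progresses : List Int) (speeds : List Int) : List Int :=
  loopA (fuelA progresses) progresses speeds [] 1 0

-- ===== PORT B =====
-- finish day of one task: d = max(1, -(-(100 - p) // s)) if s > 0 else 1
def dayB (p s : Int) : Int :=
  if 0 < s then max 1 (-(PySem.Int.floordiv (-(100 - p)) s)) else 1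

def loopB : List (Int × Int) → List Int → Int → Int → List Int
  | [], ans, _, count => ans ++ [count]
  | (p, s) :: rest, ans, cur, count =>
    let d := dayB p s
    if cur < d then
      loopB rest (if count ≠ 0 then ans ++ [count] else ans) d 1
    else
      loopB rest ans cur (count + 1)

def solution_alt (progresses : List Int) (speeds : List Int) : List Int :=
  loopB (progresses.zip speeds) [] 0 0

-- ===== PRECONDITION & SPEC =====
-- the largest finish day among the improving (speed > 0) tasks, at least 1
def fstep (m : Int) (q : Int × Int) : Int :=
  if 0 < q.2 then max m (max 1 (-(PySem.Int.floordiv (-(100 - q.1)) q.2))) else m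

def preM (progresses : List Int) (speeds : List Int) : Int :=
  (progresses.zip speeds).foldl fstep 1

-- Pre_ excludes inputs with fewer speeds than progresses (A raises IndexError) and those with a
-- non-improving (speed ≤ 0) task that is not provably complete by the overall last deploy day M:
-- A normally diverges there, though it can still return when such a task happens to be complete on
-- its arrival day, and B then still agrees with A.
def Pre_solution (progresses : List Int) (speeds : List Int) : Prop :=
  progresses.length ≤ speeds.length ∧
    ∀ q ∈ progresses.zip speeds, 0 < q.2 ∨ 100 ≤ q.1 + q.2 * preM progresses speeds
instance (progresses : List Int) (speeds : List Int) : Decidable (Pre_solution progresses speeds) := by unfold Pre_solution; infer_instance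

def pvWitness_solution : List Int × List Int := ([93, 30, 55], [1, 30, 5])

def Spec_solution (progresses : List Int) (speeds : List Int) (out : List Int) : Prop := out = solution_alt progresses speeds
instance (progresses : List Int) (speeds : List Int) (out : List Int) : Decidable (Spec_solution progresses speeds out) := by unfold Spec_solution; infer_instance

-- ===== CLAIM (what is proved, stated in full; the proofs are below) =====
def Claim_equal_solution : Prop := ∀ (progresses : List Int) (speeds : List Int), Dom_solution progresses speeds → Pre_solution progresses speeds → Spec_solution progresses speeds (solution progresses speeds)

-- ===== LEMMAS AND PROOFS =====

-- A's pop condition for an improving task is exactly "days has reached the finish day".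
lemma done_iff (p s days : Int) (hs : 0 < s) (hd : 1 ≤ days) :
    (100 ≤ p + s * days) ↔ dayB p s ≤ days := by
  unfold dayB
  rw [if_pos hs, max_le_iff]
  constructor
  · intro h
    refine ⟨hd, ?_⟩
    have : -days ≤ PySem.Int.floordiv (-(100 - p)) s := by
      rw [PySem.Int.le_floordiv_iff_mul_le hs]
      nlinarith
    omega
  · rintro ⟨-, h⟩
    have h' : -days ≤ PySem.Int.floordiv (-(100 - p)) s := by omega
    rw [PySem.Int.le_floordiv_iff_mul_le hs] at h'
    nlinarith

lemma dayB_le (p s : Int) (hs : 0 < s) : dayB p s ≤ max 1 (100 - p) := by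
  unfold dayB
  rw [if_pos hs]
  by_cases h : 100 - p ≤ 0
  · have : 0 ≤ PySem.Int.floordiv (-(100 - p)) s := by
      rw [PySem.Int.le_floordiv_iff_mul_le hs]; omega
    simp only [max_le_iff]; omega
  · have : -(100 - p) ≤ PySem.Int.floordiv (-(100 - p)) s := by
      rw [PySem.Int.le_floordiv_iff_mul_le hs]
      nlinarith
    simp only [max_le_iff]; omega

lemma dayB_pos (p s : Int) : 1 ≤ dayB p s := by
  unfold dayB; split
  · exact le_max_left _ _
  · exact le_refl _

lemma le_foldl_fstep : ∀ (l : List (Int × Int)) (m : Int), m ≤ l.foldl fstep m := by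
  intro l
  induction l with
  | nil => intro m; exact le_refl m
  | cons q l ih =>
    intro m
    refine le_trans ?_ (ih (fstep m q))
    unfold fstep; split
    · exact le_max_left _ _
    · exact le_refl _

lemma mem_le_foldl_fstep : ∀ (l : List (Int × Int)) (m : Int) (q : Int × Int),
    q ∈ l → 0 < q.2 → dayB q.1 q.2 ≤ l.foldl fstep m := by
  intro l
  induction l with
  | nil => intro m q hq; simp at hq
  | cons r l ih =>
    intro m q hq hs
    rcases List.mem_cons.1 hq with rfl | hq'
    · refine le_trans ?_ (le_foldl_fstep l (fstep m q))
      unfold fstep dayB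
      rw [if_pos hs, if_pos hs]
      exact le_max_right _ _
    · exact ih (fstep m r) q hq' hs

-- climbing `days` (one increment per iteration) up to the finish day, then popping the task
lemma climb (p s : Int) (ps ss : List Int) (hs : 0 < s) :
    ∀ (g : Nat), ∀ (fuel : Nat) (days count : Int) (ans : List Int),
    1 ≤ days → (dayB p s - days).toNat = g → g + 1 ≤ fuel →
    loopA fuel (p :: ps) (s :: ss) ans days count =
      loopA (fuel - (g + 1)) ps ss
        (if 0 < count ∧ days < dayB p s then ans ++ [count] else ans)
        (max days (dayB p s))
        (if days < dayB p s then 1 else count + 1) := by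
  intro g
  induction g with
  | zero =>
    intro fuel days count ans hd hg hf
    obtain ⟨f, rfl⟩ : ∃ f, fuel = f + 1 := ⟨fuel - 1, by omega⟩
    have hle : dayB p s ≤ days := by omega
    have hdone : 100 ≤ p + s * days := (done_iff p s days hs hd).2 hle
    simp only [loopA, if_pos hdone]
    have h1 : ¬ days < dayB p s := by omega
    simp [h1, max_eq_left hle]
  | succ g ih =>
    intro fuel days count ans hd hg hf
    obtain ⟨f, rfl⟩ : ∃ f, fuel = f + 1 := ⟨fuel - 1, by omega⟩
    have hlt : days < dayB p s := by omega
    have hnot : ¬ 100 ≤ p + s * days := by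
      rw [done_iff p s days hs hd]; omega
    simp only [loopA, if_neg hnot]
    rw [ih f (days + 1) 0 (if 0 < count then ans ++ [count] else ans) (by omega) (by omega) (by omega)]
    have hmax : max (days + 1) (dayB p s) = max days (dayB p s) := by omega
    have hcnt : (if days + 1 < dayB p s then (1 : Int) else 0 + 1) = 1 := by split <;> omega
    have hans : (if 0 < (0 : Int) ∧ days + 1 < dayB p s then (if 0 < count then ans ++ [count] else ans) ++ [0] else (if 0 < count then ans ++ [count] else ans)) = (if 0 < count ∧ days < dayB p s then ans ++ [count] else ans) := by
      simp [hlt]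
    rw [hmax, hcnt, hans]
    simp only [if_pos hlt]
    congr 1
    omega

-- main invariant: A's state (days = max 1 cur, same ans/count) tracks B's state; M bounds
-- every improving task's finish day and every non-improving task is complete by day M
lemma main_loop (M : Int) (hM : 1 ≤ M) :
    ∀ (ps ss ans : List Int) (cur count : Int) (fuel : Nat),
    ps.length ≤ ss.length →
    (∀ q ∈ ps.zip ss, (0 < q.2 ∧ dayB q.1 q.2 ≤ M) ∨ (q.2 ≤ 0 ∧ 100 ≤ q.1 + q.2 * M)) →
    0 ≤ cur → cur ≤ M → (cur = 0 → count = 0) → 0 ≤ count →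
    fuelA ps ≤ fuel →
    loopA fuel ps ss ans (max 1 cur) count = loopB (ps.zip ss) ans cur count := by
  intro ps
  induction ps with
  | nil =>
    intro ss ans cur count fuel _ _ _ _ _ _ _
    cases fuel <;> simp [loopA, loopB]
  | cons p ps ih =>
    intro ss ans cur count fuel hlen hq hcur hcurM hcz hcnt hfuel
    match ss with
    | [] => simp at hlen
    | s :: ss =>
      have hhead := hq (p, s) (by simp)
      have hd1 : (1 : Int) ≤ dayB p s := dayB_pos p s
      have hrest : fuelA (p :: ps) = 101 + p.natAbs + fuelA ps := by
        simp [fuelA]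
      have hdays : (1 : Int) ≤ max 1 cur := le_max_left _ _
      have hqtail : ∀ q ∈ ps.zip ss, (0 < q.2 ∧ dayB q.1 q.2 ≤ M) ∨ (q.2 ≤ 0 ∧ 100 ≤ q.1 + q.2 * M) :=
        fun q hmem => hq q (by simp [hmem])
      have hlen' : ps.length ≤ ss.length := by simpa using hlen
      rcases hhead with ⟨hs, hdM⟩ | ⟨hs, hcomp⟩
      · -- improving task: climb to its finish day, then pop
        have hdle : dayB p s ≤ max 1 (100 - p) := dayB_le p s hs
        have hgap : (dayB p s - max 1 cur).toNat + 1 ≤ 101 + p.natAbs := by omega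
        rw [climb p s ps ss hs (dayB p s - max 1 cur).toNat fuel (max 1 cur) count ans hdays rfl (by omega)]
        simp only [List.zip_cons_cons, loopB]
        by_cases hc : cur < dayB p s
        · have hlt : max 1 cur < dayB p s ∨ (cur = 0 ∧ dayB p s = 1) := by omega
          have hmax : max (max 1 cur) (dayB p s) = max 1 (dayB p s) := by omega
          rcases hlt with hlt | ⟨hc0, hd0⟩
          · have hansb : (if 0 < count ∧ max 1 cur < dayB p s then ans ++ [count] else ans) = (if count ≠ 0 then ans ++ [count] else ans) := by
              by_cases h0 : count = 0
              · simp [h0]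
              · have h1 : 0 < count := by omega
                simp [h0, hlt, h1]
            rw [hansb, hmax, if_pos hlt, if_pos hc]
            exact ih ss (if count ≠ 0 then ans ++ [count] else ans) (dayB p s) 1 (fuel - ((dayB p s - max 1 cur).toNat + 1)) hlen' hqtail (by omega) hdM (by omega) (by omega) (by omega)
          · -- cur = 0 (so count = 0) and the task finishes on day 1: A pops at once
            have hcnt0 : count = 0 := hcz hc0
            have hnlt : ¬ max 1 cur < dayB p s := by omega
            rw [if_neg (by simp [hnlt]), if_neg hnlt, hmax, if_pos hc]
            have : count + 1 = 1 := by omega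
            rw [this]
            have := ih ss ans (dayB p s) 1 (fuel - ((dayB p s - max 1 cur).toNat + 1)) hlen' hqtail (by omega) hdM (by omega) (by omega) (by omega)
            simpa [hd0, hcnt0] using this
        · have hcur1 : 1 ≤ cur := by omega
          have hnlt : ¬ max 1 cur < dayB p s := by omega
          have hmax : max (max 1 cur) (dayB p s) = max 1 cur := by omega
          rw [if_neg (by simp [hnlt]), if_neg hnlt, hmax, if_neg hc]
          exact ih ss ans cur (count + 1) (fuel - ((dayB p s - max 1 cur).toNat + 1)) hlen' hqtail hcur hcurM (by omega) (by omega) (by omega)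
      · -- non-improving task, complete by day M ≥ its arrival day: A pops it at once
        obtain ⟨f, hf⟩ : ∃ f, fuel = f + 1 := ⟨fuel - 1, by omega⟩
        subst hf
        have harr : max 1 cur ≤ M := by omega
        have hdone : 100 ≤ p + s * max 1 cur := by nlinarith
        simp only [loopA, if_pos hdone, List.zip_cons_cons, loopB]
        have hdb : dayB p s = 1 := by unfold dayB; rw [if_neg (by omega)]
        rw [hdb]
        by_cases hc0 : cur = 0
        · have hcnt0 : count = 0 := hcz hc0
          rw [if_pos (by omega), if_neg (by omega)]
          have := ih ss ans 1 1 f hlen' hqtail (by omega) hM (by omega) (by omega) (by omega)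
          simpa [hc0, hcnt0] using this
        · rw [if_neg (by omega)]
          have := ih ss ans cur (count + 1) f hlen' hqtail hcur hcurM (by omega) (by omega) (by omega)
          simpa using this

-- ===== VERDICT (by name: the statement is the Claim_ definition above) =====
theorem solution_spec : Claim_equal_solution := by
  intro progresses speeds _ hpre
  unfold Spec_solution solution solution_alt
  have hM : 1 ≤ preM progresses speeds := le_foldl_fstep _ _
  have hq : ∀ q ∈ progresses.zip speeds,
      (0 < q.2 ∧ dayB q.1 q.2 ≤ preM progresses speeds) ∨ (q.2 ≤ 0 ∧ 100 ≤ q.1 + q.2 * preM progresses speeds) := by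
    intro q hmem
    rcases hpre.2 q hmem with hs | hcomp
    · exact Or.inl ⟨hs, mem_le_foldl_fstep _ 1 q hmem hs⟩
    · by_cases hs : 0 < q.2
      · exact Or.inl ⟨hs, mem_le_foldl_fstep _ 1 q hmem hs⟩
      · exact Or.inr ⟨by omega, hcomp⟩
  have := main_loop (preM progresses speeds) hM progresses speeds [] 0 0 (fuelA progresses) hpre.1 hq (by omega) (by omega) (fun _ => rfl) (by omega) (le_refl _)
  simpa using this
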